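-- pv_equiv track=rewrite | github.com/hjyoon/python_ref_for_test | division_to_decimal_places.py | division_to_decimal_places
-- ===== SOURCE A (Python) =====
-- def division_to_decimal_places(numerator, denominator, decimal_places):
--     # 결과의 부호 결정: numerator와 denominator의 곱이 음수이면 결과는 음수
--     sign = "-" if numerator * denominator < 0 else ""
--
--     # 음수를 처리하기 위해 절대값을 사용
--     numerator, denominator = abs(numerator), abs(denominator)
--
--     integer_part, remainder = divmod(numerator, denominator)
--     decimal_part = []
--
--     for _ in range(decimal_places):
--         remainder *= 10
--         digit, remainder = divmod(remainder, denominator)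
--         decimal_part.append(digit)
--         if remainder == 0:
--             break
--
--     return sign + f"{integer_part}." + "".join(map(str, decimal_part))
-- ===== SOURCE B (Python) =====
-- def division_to_decimal_places(numerator, denominator, decimal_places):
--     # Chunked long division: nine decimal digits per big-integer divmod,
--     # stopping as soon as the remainder reaches zero.
--     sign = "-" if numerator * denominator < 0 else ""
--     n, d = abs(numerator), abs(denominator)
--     integer_part, r = divmod(n, d)
--     CHUNK = 9
--     pieces = []
--     remaining = decimal_places
--     while remaining > 0:
--         w = min(remaining, CHUNK)
--         q, r = divmod(r * 10 ** w, d)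
--         s = str(q).zfill(w)
--         if r == 0:
--             # exact from here on: drop the padding zeros, keep at least one digit
--             pieces.append(s.rstrip("0") or "0")
--             break
--         pieces.append(s)
--         remaining -= w
--     return f"{sign}{integer_part}.{''.join(pieces)}"
-- ===== Notes on version B (the rewrite author's own statement) =====
-- stated objective: faster
-- what changed: Replaces A's per-digit long-division loop (one small divmod and one list append per decimal place) with chunked long division: one big-integer divmod produces nine zero-padded digits per iteration, the loop stops when the remainder reaches zero, and the final chunk drops its padding zeros (keeping at least one digit).
import Mathlib
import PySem

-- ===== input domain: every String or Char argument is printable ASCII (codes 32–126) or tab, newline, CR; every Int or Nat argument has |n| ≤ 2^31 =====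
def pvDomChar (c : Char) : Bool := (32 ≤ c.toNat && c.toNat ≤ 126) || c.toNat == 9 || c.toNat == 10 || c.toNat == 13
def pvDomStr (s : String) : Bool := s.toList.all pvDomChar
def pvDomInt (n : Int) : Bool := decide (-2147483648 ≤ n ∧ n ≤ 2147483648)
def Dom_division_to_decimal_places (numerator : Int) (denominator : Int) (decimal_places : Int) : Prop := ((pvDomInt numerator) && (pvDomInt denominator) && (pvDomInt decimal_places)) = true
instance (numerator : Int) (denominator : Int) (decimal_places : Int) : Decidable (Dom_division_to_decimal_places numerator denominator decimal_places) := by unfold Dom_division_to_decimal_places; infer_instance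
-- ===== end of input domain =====

-- B replaces A's digit-by-digit long-division loop by chunked long division: nine
-- decimal digits per big-integer divmod, stopping when the remainder reaches zero
-- (objective: faster by a constant factor).

-- ===== PORT A =====
-- the 'for _ in range(decimal_places)' loop: state = (remainder, decimal_part), break when remainder hits 0
def aLoop (den : Int) : Nat → Int → List Int → List Int
  | 0, _, acc => acc
  | k+1, r, acc =>
    let r2 := r * 10
    let digit := PySem.Int.floordiv r2 den
    let r' := PySem.Int.mod r2 den
    if r' = 0 then acc ++ [digit] else aLoop den k r' (acc ++ [digit])

def division_to_decimal_places (numerator : Int) (denominator : Int) (decimal_places : Int) : String :=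
  let sign := if numerator * denominator < 0 then "-" else ""
  let n := |numerator|
  let d := |denominator|
  let integer_part := PySem.Int.floordiv n d
  let remainder := PySem.Int.mod n d
  let decimal_part := aLoop d decimal_places.toNat remainder []
  sign ++ PySem.Int.toStr integer_part ++ "." ++ PySem.Str.join "" (decimal_part.map PySem.Int.toStr)

-- ===== PORT B =====
-- hand port of str.rstrip("0") (PySem has no rstrip-with-chars): drop trailing '0' characters; exact
def rstrip0 (cs : List Char) : List Char := (cs.reverse.dropWhile (· == '0')).reverse

-- the 'while remaining > 0' chunk loop: state = (remaining, r, pieces); CHUNK = 9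
def bLoop (d : Int) (remaining : Int) (r : Int) (pieces : List (List Char)) : List (List Char) :=
  if h : remaining > 0 then
    let w := min remaining 9
    let q := PySem.Int.floordiv (r * 10 ^ w.toNat) d
    let r' := PySem.Int.mod (r * 10 ^ w.toNat) d
    let s := PySem.Chars.zfill (PySem.Int.toChars q) w
    if r' = 0 then pieces ++ [if rstrip0 s = [] then ['0'] else rstrip0 s]
    else bLoop d (remaining - w) r' (pieces ++ [s])
  else pieces
termination_by remaining.toNat
decreasing_by omega

def division_to_decimal_places_alt (numerator : Int) (denominator : Int) (decimal_places : Int) : String :=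
  let sign := if numerator * denominator < 0 then "-" else ""
  let n := |numerator|
  let d := |denominator|
  let integer_part := PySem.Int.floordiv n d
  let r := PySem.Int.mod n d
  let pieces := bLoop d decimal_places r []
  sign ++ PySem.Int.toStr integer_part ++ "." ++ String.ofList pieces.flatten

-- ===== PRECONDITION & SPEC =====
-- Python raises ZeroDivisionError exactly when denominator = 0 (in both A and B)
def Pre_division_to_decimal_places (numerator : Int) (denominator : Int) (decimal_places : Int) : Prop := denominator ≠ 0
instance (numerator : Int) (denominator : Int) (decimal_places : Int) : Decidable (Pre_division_to_decimal_places numerator denominator decimal_places) := by unfold Pre_division_to_decimal_places; infer_instance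
def pvWitness_division_to_decimal_places : Int × Int × Int := (31, 300, 4)

def Spec_division_to_decimal_places (numerator : Int) (denominator : Int) (decimal_places : Int) (out : String) : Prop := out = division_to_decimal_places_alt numerator denominator decimal_places
instance (numerator : Int) (denominator : Int) (decimal_places : Int) (out : String) : Decidable (Spec_division_to_decimal_places numerator denominator decimal_places out) := by unfold Spec_division_to_decimal_places; infer_instance

-- ===== CLAIM (what is proved, stated in full; the proofs are below) =====
def Claim_equal_division_to_decimal_places : Prop := ∀ (numerator : Int) (denominator : Int) (decimal_places : Int), Dom_division_to_decimal_places numerator denominator decimal_places → Pre_division_to_decimal_places numerator denominator decimal_places → Spec_division_to_decimal_places numerator denominator decimal_places (division_to_decimal_places numerator denominator decimal_places)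

-- ===== LEMMAS AND PROOFS =====

-- A's long-division digit stream, in Nat (most-significant digit first, early break)
def loopN (D : Nat) : Nat → Nat → List Nat
  | 0, _ => []
  | k+1, r => if (r*10) % D = 0 then [(r*10)/D] else (r*10)/D :: loopN D k ((r*10)%D)

-- decimal digit characters of n, as Nat.toDigits 10 produces them
def myDigits (n : Nat) : List Char :=
  if n < 10 then [Nat.digitChar n]
  else myDigits (n / 10) ++ [Nat.digitChar (n % 10)]
  decreasing_by exact Nat.div_lt_self (by omega) (by omega)

-- the k decimal digit characters of v, least-significant first (with leading-zero padding)
def revDigs : Nat → Nat → List Char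
  | 0, _ => []
  | k+1, v => Nat.digitChar (v % 10) :: revDigs k (v / 10)

lemma fdiv_cast (a b : Nat) : PySem.Int.floordiv (a:Int) (b:Int) = ((a/b : Nat) : Int) := by
  rw [PySem.Int.floordiv, Int.fdiv_eq_ediv]
  simp

lemma fmod_cast (a b : Nat) : PySem.Int.mod (a:Int) (b:Int) = ((a%b : Nat) : Int) := by
  rw [PySem.Int.mod, Int.fmod_eq_emod]
  simp

lemma aLoop_eq (D : Nat) (hD : 0 < D) : ∀ (k r : Nat) (acc : List Int),
    aLoop (D : Int) k (r : Int) acc = acc ++ (loopN D k r).map Int.ofNat := by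
  intro k
  induction k with
  | zero => intro r acc; simp [aLoop, loopN]
  | succ k ih =>
    intro r acc
    have h1 : ((r : Int) * 10) = ((r * 10 : Nat) : Int) := by push_cast; ring
    have hfd := fdiv_cast (r*10) D
    have hmd := fmod_cast (r*10) D
    simp only [aLoop, h1, hfd, hmd]
    by_cases h : (r*10) % D = 0
    · simp [h, loopN]
    · have h' : (((r*10)%D : Nat) : Int) ≠ 0 := by exact_mod_cast h
      rw [if_neg h', ih ((r*10)%D) (acc ++ [(((r*10)/D : Nat) : Int)])]
      simp [loopN, h]

lemma loopN_lt (D : Nat) (hD : 0 < D) : ∀ (k r : Nat), r < D → ∀ x ∈ loopN D k r, x < 10 := by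
  intro k
  induction k with
  | zero => intro r _ x hx; simp [loopN] at hx
  | succ k ih =>
    intro r hr x hx
    have hq : (r*10)/D < 10 := by
      rw [Nat.div_lt_iff_lt_mul hD]
      calc r*10 < D*10 := by omega
        _ = 10*D := by ring
    simp only [loopN] at hx
    split_ifs at hx with h
    · simp at hx; omega
    · rcases List.mem_cons.mp hx with h1 | h1
      · omega
      · exact ih ((r*10)%D) (Nat.mod_lt _ hD) x h1

lemma toDigitsCore10_eq : ∀ (f : Nat), 0 < f → ∀ (n : Nat), n < 10^f → ∀ (ds : List Char),
    Nat.toDigitsCore 10 f n ds = myDigits n ++ ds := by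
  intro f
  induction f with
  | zero => omega
  | succ f ih =>
    intro _ n hn ds
    by_cases h : n / 10 = 0
    · have hn10 : n < 10 := by omega
      simp only [Nat.toDigitsCore, h, if_pos]
      rw [myDigits]
      simp [hn10, Nat.mod_eq_of_lt hn10]
    · have hge : 10 ≤ n := by
        by_contra hc
        exact h (Nat.div_eq_of_lt (by omega))
      have hlt : n / 10 < 10^f := by
        rw [Nat.div_lt_iff_lt_mul (by omega)]
        calc n < 10^(f+1) := hn
          _ = 10^f * 10 := by ring
      have hf : 0 < f := by
        rcases Nat.eq_zero_or_pos f with h0 | h0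
        · subst h0; simp at hlt; omega
        · exact h0
      simp only [Nat.toDigitsCore, h, if_false]
      rw [ih hf (n/10) hlt]
      conv_rhs => rw [myDigits]
      simp [show ¬ n < 10 by omega]

lemma toDigits10_eq (n : Nat) : Nat.toDigits 10 n = myDigits n := by
  have h : n < 10^(n+1) := by
    calc n < 2^n := Nat.lt_two_pow_self
      _ ≤ 2^(n+1) := Nat.pow_le_pow_right (by omega) (by omega)
      _ ≤ 10^(n+1) := Nat.pow_le_pow_left (by omega) _
  have := toDigitsCore10_eq (n+1) (by omega) n h []
  simpa [Nat.toDigits] using this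

lemma myDigits_ne_nil (v : Nat) : myDigits v ≠ [] := by
  rw [myDigits]
  split_ifs <;> simp

lemma myDigits_mem (v : Nat) : ∀ c ∈ myDigits v, ∃ m, m < 10 ∧ c = Nat.digitChar m := by
  induction v using myDigits.induct with
  | case1 n h =>
    intro c hc
    rw [myDigits] at hc
    simp [h] at hc
    exact ⟨n, h, hc⟩
  | case2 n h ih =>
    intro c hc
    rw [myDigits] at hc
    simp only [h, if_false, List.mem_append, List.mem_singleton] at hc
    rcases hc with hc | hc
    · exact ih c hc
    · exact ⟨n % 10, Nat.mod_lt _ (by omega), hc⟩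

lemma myDigits_len_le : ∀ (k : Nat), 0 < k → ∀ v, v < 10^k → (myDigits v).length ≤ k := by
  intro k
  induction k with
  | zero => omega
  | succ k ih =>
    intro _ v hv
    rw [myDigits]
    split_ifs with h
    · simp
    · have hge : 10 ≤ v := by omega
      have hlt : v / 10 < 10^k := by
        rw [Nat.div_lt_iff_lt_mul (by omega)]
        calc v < 10^(k+1) := hv
          _ = 10^k * 10 := by ring
      have hk0 : 0 < k := by
        rcases Nat.eq_zero_or_pos k with h0 | h0
        · subst h0; simp at hlt; omega
        · exact h0
      have := ih hk0 (v/10) hlt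
      simp only [List.length_append, List.length_singleton]
      omega

lemma dc_ne_zero {m : Nat} (h0 : 0 < m) (h10 : m < 10) : Nat.digitChar m ≠ '0' := by
  interval_cases m <;> decide

lemma myDigits_head_not_sign (v : Nat) (c : Char) (rest : List Char)
    (h : myDigits v = c :: rest) : ¬ (c = '+' ∨ c = '-') := by
  have hc : c ∈ myDigits v := by rw [h]; exact List.mem_cons_self
  obtain ⟨m, hm, rfl⟩ := myDigits_mem v c hc
  interval_cases m <;> decide

lemma zfill_digits (k v : Nat) (hk : 0 < k) (hv : v < 10^k) :
    PySem.Chars.zfill (myDigits v) (k : Int) =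
      List.replicate (k - (myDigits v).length) '0' ++ myDigits v := by
  have hlen : (myDigits v).length ≤ k := myDigits_len_le k hk v hv
  rw [PySem.Chars.zfill.eq_def]
  split_ifs with h
  · have : k ≤ (myDigits v).length := by exact_mod_cast h
    have hz : k - (myDigits v).length = 0 := by omega
    simp [hz]
  · obtain ⟨c, rest, hcs⟩ : ∃ c rest, myDigits v = c :: rest := by
      cases hcase : myDigits v with
      | nil => exact absurd hcase (myDigits_ne_nil v)
      | cons c rest => exact ⟨c, rest, rfl⟩
    rw [hcs]
    simp only [myDigits_head_not_sign v c rest hcs, if_false]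
    rw [← hcs]
    simp

lemma myDigits_zero : myDigits 0 = ['0'] := by
  rw [myDigits]; simp; decide

lemma revDigs_eq : ∀ (k : Nat), 0 < k → ∀ v, v < 10^k →
    revDigs k v = (myDigits v).reverse ++ List.replicate (k - (myDigits v).length) '0' := by
  intro k
  induction k with
  | zero => omega
  | succ k ih =>
    intro _ v hv
    rw [revDigs]
    by_cases hk0 : k = 0
    · subst hk0
      have hv10 : v < 10 := by simpa using hv
      have hd0 : v / 10 = 0 := Nat.div_eq_of_lt hv10
      rw [myDigits]
      simp [hv10, Nat.mod_eq_of_lt hv10, hd0, revDigs]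
    · have hkpos : 0 < k := by omega
      have hdlt : v / 10 < 10^k := by
        rw [Nat.div_lt_iff_lt_mul (by omega)]
        calc v < 10^(k+1) := hv
          _ = 10^k * 10 := by ring
      rw [ih hkpos (v/10) hdlt]
      by_cases hv10 : v < 10
      · have hd0 : v / 10 = 0 := Nat.div_eq_of_lt hv10
        rw [hd0, myDigits_zero]
        conv_rhs => rw [myDigits]
        simp only [hv10, if_pos, List.reverse_singleton, List.singleton_append,
          List.length_singleton, Nat.mod_eq_of_lt hv10]
        have h1 : ('0':Char) :: List.replicate (k-1) '0' = List.replicate k '0' := by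
          rw [← List.replicate_succ]
          congr 1
          omega
        have h2 : k + 1 - 1 = k := by omega
        rw [h2, h1]
      · conv_rhs => rw [myDigits]
        simp only [hv10, if_false, List.reverse_append, List.reverse_singleton,
          List.length_append, List.length_singleton]
        simp only [Nat.mod_eq_of_lt, List.singleton_append, List.cons_append]
        have : k + 1 - ((myDigits (v/10)).length + 1) = k - (myDigits (v/10)).length := by omega
        rw [this]
        simp

lemma zfill_eq_revDigs (k v : Nat) (hk : 0 < k) (hv : v < 10^k) :
    PySem.Chars.zfill (myDigits v) (k : Int) = (revDigs k v).reverse := by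
  rw [zfill_digits k v hk hv, revDigs_eq k hk v hv, List.reverse_append,
    List.reverse_reverse, List.reverse_replicate]

lemma revDigs_zero_val (k : Nat) : revDigs k 0 = List.replicate k '0' := by
  induction k with
  | zero => rfl
  | succ k ih =>
    have h0 : Nat.digitChar 0 = '0' := by decide
    simp [revDigs, ih, List.replicate_succ, h0]

lemma revDigs_addMSD (q : Nat) (hq : q < 10) : ∀ (k w : Nat), w < 10^k →
    revDigs (k+1) (q*10^k + w) = revDigs k w ++ [Nat.digitChar q] := by
  intro k
  induction k with
  | zero =>
    intro w hw
    have hw0 : w = 0 := by simpa using hw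
    subst hw0
    simp [revDigs, Nat.mod_eq_of_lt hq, Nat.div_eq_of_lt hq]
  | succ k ih =>
    intro w hw
    have hdvd : 10 ∣ q * 10^(k+1) := ⟨q * 10^k, by ring⟩
    have h10 : (q*10^(k+1) + w) % 10 = w % 10 := by
      obtain ⟨c, hc⟩ := hdvd
      omega
    have hdiv : (q*10^(k+1) + w) / 10 = q*10^k + w/10 := by
      have h1 : q*10^(k+1) + w = w + (q*10^k) * 10 := by ring
      rw [h1, Nat.add_mul_div_right _ _ (by omega : (0:Nat) < 10)]
      omega
    have hwlt : w / 10 < 10^k := by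
      rw [Nat.div_lt_iff_lt_mul (by omega)]
      calc w < 10^(k+1) := hw
        _ = 10^k * 10 := by ring
    rw [revDigs, h10, hdiv, ih (w/10) hwlt, revDigs]
    simp

lemma revDigs_mul_pow (m : Nat) : ∀ (j v : Nat),
    revDigs (j+m) (v * 10^j) = List.replicate j '0' ++ revDigs m v := by
  intro j
  induction j with
  | zero => intro v; simp
  | succ j ih =>
    intro v
    have h10 : (v * 10^(j+1)) % 10 = 0 := by
      have : v * 10^(j+1) = (v * 10^j) * 10 := by ring
      omega
    have hdiv : (v * 10^(j+1)) / 10 = v * 10^j := by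
      have : v * 10^(j+1) = (v * 10^j) * 10 := by ring
      omega
    have harr : j + 1 + m = (j + m) + 1 := by omega
    rw [harr, revDigs, h10, hdiv, ih v]
    simp [List.replicate_succ]
    decide

lemma step_facts (D : Nat) (hD : 0 < D) (k r : Nat) (hr : r < D) :
    (r*10)/D < 10 ∧ ((r*10)%D) * 10^k / D < 10^k ∧
      r * 10^(k+1) % D = ((r*10)%D) * 10^k % D ∧
      r * 10^(k+1) / D = ((r*10)/D) * 10^k + ((r*10)%D) * 10^k / D := by
  set q := (r*10)/D with hq
  set r' := (r*10)%D with hr'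
  have hqr : D * q + r' = r * 10 := Nat.div_add_mod (r*10) D
  have h1 : q < 10 := by
    rw [hq, Nat.div_lt_iff_lt_mul hD]
    calc r*10 < D*10 := by omega
      _ = 10*D := by ring
  have h2 : r' * 10^k / D < 10^k := by
    rw [Nat.div_lt_iff_lt_mul hD]
    have hrD : r' < D := Nat.mod_lt _ hD
    have hp : 0 < 10^k := Nat.pow_pos (by omega)
    calc r' * 10^k < D * 10^k := Nat.mul_lt_mul_of_pos_right hrD hp
      _ = 10^k * D := by ring
  have hkey : r * 10^(k+1) = r' * 10^k + (q * 10^k) * D := by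
    calc r * 10^(k+1) = (r*10) * 10^k := by ring
      _ = (D * q + r') * 10^k := by rw [hqr]
      _ = r' * 10^k + (q * 10^k) * D := by ring
  have h3 : r * 10^(k+1) % D = r' * 10^k % D := by
    rw [hkey, Nat.add_mul_mod_self_right]
  have h4 : r * 10^(k+1) / D = q * 10^k + r' * 10^k / D := by
    rw [hkey, Nat.add_mul_div_right _ _ hD]
    omega
  exact ⟨h1, h2, h3, h4⟩

-- full-length case: the remainder never hits 0 within k steps
lemma loop_full (D : Nat) (hD : 0 < D) : ∀ (k r : Nat), r < D → (r * 10^k) % D ≠ 0 →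
    (loopN D k r).map Nat.digitChar = (revDigs k ((r * 10^k) / D)).reverse := by
  intro k
  induction k with
  | zero => intro r _ _; simp [loopN, revDigs]
  | succ k ih =>
    intro r hr hrem
    obtain ⟨hq10, hV', hcong, hval⟩ := step_facts D hD k r hr
    have hr'0 : (r*10) % D ≠ 0 := by
      intro h
      apply hrem
      have hdvd : D ∣ r * 10 := Nat.dvd_of_mod_eq_zero h
      have hdvd2 : D ∣ r * 10^(k+1) := by
        have h2 : r * 10^(k+1) = (r*10) * 10^k := by ring
        rw [h2]
        exact hdvd.mul_right _
      exact Nat.mod_eq_zero_of_dvd hdvd2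
    have hrem' : ((r*10)%D) * 10^k % D ≠ 0 := by rw [← hcong]; exact hrem
    rw [loopN, if_neg hr'0]
    rw [List.map_cons, ih ((r*10)%D) (Nat.mod_lt _ hD) hrem']
    rw [hval, revDigs_addMSD ((r*10)/D) hq10 k _ hV', List.reverse_append]
    simp

lemma dropWhile_rep (n : Nat) :
    List.dropWhile (· == '0') (List.replicate n '0') = [] := by
  induction n with
  | zero => rfl
  | succ n ih => simpa [List.replicate_succ, List.dropWhile_cons] using ih

-- early-exit case: the division is exact within k steps and r ≠ 0
lemma loop_exact (D : Nat) (hD : 0 < D) : ∀ (k r : Nat), r < D → r ≠ 0 → (r * 10^(k+1)) % D = 0 →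
    ((loopN D (k+1) r).map Nat.digitChar).reverse
        = (revDigs (k+1) ((r * 10^(k+1)) / D)).dropWhile (· == '0')
      ∧ loopN D (k+1) r ≠ [] := by
  intro k
  induction k with
  | zero =>
    intro r hr hr0 hrem
    have hrem1 : (r*10) % D = 0 := by simpa using hrem
    have hqr : D * ((r*10)/D) + (r*10) % D = r * 10 := Nat.div_add_mod (r*10) D
    have hq0 : 0 < (r*10)/D := by
      rcases Nat.eq_zero_or_pos ((r*10)/D) with h | h
      · rw [h] at hqr; omega
      · exact h
    have hq10 : (r*10)/D < 10 := by
      rw [Nat.div_lt_iff_lt_mul hD]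
      calc r*10 < D*10 := by omega
        _ = 10*D := by ring
    have hV : r * 10^(0+1) / D = (r*10)/D := by norm_num
    rw [loopN, if_pos hrem1, hV]
    constructor
    · have hrv : revDigs (0+1) ((r*10)/D) = [Nat.digitChar ((r*10)/D)] := by
        rw [revDigs]
        rw [Nat.mod_eq_of_lt hq10]
        rfl
      rw [hrv]
      simp [List.dropWhile_cons, dc_ne_zero hq0 hq10]
    · simp
  | succ k ih =>
    intro r hr hr0 hrem
    obtain ⟨hq10, hV', hcong, hval⟩ := step_facts D hD (k+1) r hr
    by_cases hcase : (r*10) % D = 0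
    · -- remainder hits 0 at the very first step: single digit q, rest zeros
      have hqr : D * ((r*10)/D) + 0 = r * 10 := by
        have := Nat.div_add_mod (r*10) D
        omega
      have hq0 : 0 < (r*10)/D := by
        rcases Nat.eq_zero_or_pos ((r*10)/D) with h | h
        · rw [h] at hqr; omega
        · exact h
      have hexact : r * 10^(k+2) / D = ((r*10)/D) * 10^(k+1) := by
        have h1 : r * 10^(k+2) = D * (((r*10)/D) * 10^(k+1)) := by
          calc r * 10^(k+2) = (r*10) * 10^(k+1) := by ring
            _ = (D * ((r*10)/D)) * 10^(k+1) := by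
                  have hmul : r * 10 = D * ((r*10)/D) := by omega
                  conv_lhs => rw [hmul]
            _ = D * (((r*10)/D) * 10^(k+1)) := by ring
        rw [h1, Nat.mul_div_cancel_left _ hD]
      rw [loopN, if_pos hcase, hexact]
      constructor
      · have hmp := revDigs_mul_pow 1 (k+1) ((r*10)/D)
        rw [show k+1+1 = k+2 from rfl] at hmp
        rw [hmp]
        rw [List.dropWhile_append]
        simp only [dropWhile_rep, List.isEmpty_nil, if_pos]
        have hrv : revDigs 1 ((r*10)/D) = [Nat.digitChar ((r*10)/D)] := by
          rw [revDigs]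
          rw [Nat.mod_eq_of_lt hq10]
          rfl
        rw [hrv]
        simp [List.dropWhile_cons, dc_ne_zero hq0 hq10]
      · simp
    · have hrem' : ((r*10)%D) * 10^(k+1) % D = 0 := by rw [← hcong]; exact hrem
      have hr'0 : (r*10)%D ≠ 0 := hcase
      obtain ⟨ihEq, ihNe⟩ := ih ((r*10)%D) (Nat.mod_lt _ hD) hr'0 hrem'
      rw [loopN, if_neg hcase]
      constructor
      · rw [List.map_cons, List.reverse_cons, ihEq]
        rw [hval, revDigs_addMSD ((r*10)/D) hq10 (k+1) _ hV', List.dropWhile_append]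
        have hne : (revDigs (k+2 - 1) (((r*10)%D) * 10^(k+1) / D)).dropWhile (· == '0') ≠ [] := by
          rw [show k+2-1 = k+1 from rfl, ← ihEq]
          simp [ihNe]
        rw [show k+2-1 = k+1 from rfl] at hne
        simp only [List.isEmpty_iff]
        rw [if_neg hne]
      · simp

lemma toChars_natCast (v : Nat) : PySem.Int.toChars (v : Int) = myDigits v := by
  rw [PySem.Int.toChars]
  simp [toDigits10_eq]

lemma toStr_digit (x : Nat) (h : x < 10) :
    PySem.Int.toStr (Int.ofNat x) = String.ofList [Nat.digitChar x] := by
  rw [PySem.Int.toStr]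
  congr 1
  have : (Int.ofNat x) = ((x : Nat) : Int) := rfl
  rw [this, toChars_natCast, myDigits]
  simp [h]

lemma join_digits (L : List Nat) (h : ∀ x ∈ L, x < 10) :
    PySem.Str.join "" ((L.map Int.ofNat).map PySem.Int.toStr)
      = String.ofList (L.map Nat.digitChar) := by
  rw [PySem.Str.join]
  congr 1
  have hmap : ((L.map Int.ofNat).map PySem.Int.toStr).map String.toList
      = (L.map Nat.digitChar).map (fun c => [c]) := by
    simp only [List.map_map]
    apply List.map_congr_left
    intro x hx
    simp only [Function.comp_apply]
    rw [toStr_digit x (h x hx)]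
    simp
  rw [hmap]
  simpa using PySem.Chars.join_nil_singletons (L.map Nat.digitChar)

lemma V_lt (D P r : Nat) (hD : 0 < D) (hP : 0 < P) (hr : r < D) : r * P / D < P := by
  rw [Nat.div_lt_iff_lt_mul hD]
  calc r * P < D * P := Nat.mul_lt_mul_of_pos_right hr hP
    _ = P * D := by ring

lemma loopN_zero_r (D k : Nat) : loopN D (k+1) 0 = [0] := by
  simp [loopN]

lemma rstrip0_reverse (x : List Char) :
    rstrip0 x.reverse = (x.dropWhile (· == '0')).reverse := by
  rw [rstrip0, List.reverse_reverse]

-- one chunk: A's digit stream of w steps = the zfill/rstrip chunk string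
lemma frac_chars_eq (D r k : Nat) (hD : 0 < D) (hrD : r < D) :
    (loopN D k r).map Nat.digitChar =
      (if ((k : Nat) : Int) = 0 then []
       else if (((r * 10^k) % D : Nat) : Int) = 0 then
         (if rstrip0 (PySem.Chars.zfill (PySem.Int.toChars ((((r * 10^k) / D : Nat)) : Int)) ((k : Nat) : Int)) = [] then ['0']
          else rstrip0 (PySem.Chars.zfill (PySem.Int.toChars ((((r * 10^k) / D : Nat)) : Int)) ((k : Nat) : Int)))
       else PySem.Chars.zfill (PySem.Int.toChars ((((r * 10^k) / D : Nat)) : Int)) ((k : Nat) : Int)) := by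
  simp only [Nat.cast_eq_zero]
  by_cases hk0 : k = 0
  · rw [if_pos hk0]
    subst hk0
    simp [loopN]
  · rw [if_neg hk0]
    have hP : 0 < 10^k := Nat.pow_pos (by omega)
    have hVlt : r * 10^k / D < 10^k := V_lt D (10^k) r hD hP hrD
    by_cases hrem : (r * 10^k) % D = 0
    · rw [if_pos hrem]
      by_cases hr0 : r = 0
      · obtain ⟨j, rfl⟩ := Nat.exists_eq_succ_of_ne_zero hk0
        simp only [Nat.succ_eq_add_one] at *
        rw [hr0, loopN_zero_r D j]
        have hV0 : (0 : Nat) * 10^(j+1) / D = 0 := by simp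
        rw [hV0]
        have hzf : PySem.Chars.zfill (PySem.Int.toChars ((0:Nat) : Int)) (((j+1 : Nat) : Int)) =
            List.replicate (j+1) '0' := by
          rw [toChars_natCast, zfill_eq_revDigs (j+1) 0 (by omega) (Nat.pow_pos (by omega)),
            revDigs_zero_val, List.reverse_replicate]
        rw [hzf]
        have hstrip : rstrip0 (List.replicate (j+1) '0') = [] := by
          have h1 := rstrip0_reverse (List.replicate (j+1) '0')
          rw [List.reverse_replicate] at h1
          rw [h1, dropWhile_rep]
          rfl
        rw [hstrip]
        simp [show Nat.digitChar 0 = '0' from by decide]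
      · obtain ⟨j, rfl⟩ := Nat.exists_eq_succ_of_ne_zero hk0
        simp only [Nat.succ_eq_add_one] at *
        obtain ⟨hEq, hNe⟩ := loop_exact D hD j r hrD hr0 hrem
        have hzf : PySem.Chars.zfill (PySem.Int.toChars ((r*10^(j+1)/D : Nat) : Int)) (((j+1 : Nat) : Int)) =
            (revDigs (j+1) (r*10^(j+1)/D)).reverse := by
          rw [toChars_natCast]
          exact zfill_eq_revDigs _ _ (by omega) hVlt
        rw [hzf, rstrip0_reverse, ← hEq, List.reverse_reverse]
        have hne2 : (loopN D (j+1) r).map Nat.digitChar ≠ [] := by simpa using hNe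
        rw [if_neg hne2]
    · rw [if_neg hrem]
      rw [toChars_natCast, zfill_eq_revDigs k _ (by omega) hVlt]
      congr 1
      exact loop_full D hD k r hrD hrem


-- the loop discards unused fuel: once exact within m steps, more fuel changes nothing
lemma loopN_fuel (D : Nat) (hD : 0 < D) : ∀ (m : Nat), 1 ≤ m → ∀ (k r : Nat), r < D →
    m ≤ k → r * 10^m % D = 0 → loopN D k r = loopN D m r := by
  intro m
  induction m with
  | zero => omega
  | succ m ih =>
    intro _ k r hrD hmk hex
    obtain ⟨k', rfl⟩ : ∃ k', k = k' + 1 := ⟨k - 1, by omega⟩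
    by_cases hbr : (r*10) % D = 0
    · rw [loopN, if_pos hbr, loopN, if_pos hbr]
    · rw [loopN, if_neg hbr, loopN, if_neg hbr]
      congr 1
      have hm1 : 1 ≤ m := by
        rcases Nat.eq_zero_or_pos m with h0 | h0
        · exfalso
          apply hbr
          subst h0
          simpa using hex
        · exact h0
      have hcong := (step_facts D hD m r hrD).2.2.1
      exact ih hm1 k' ((r*10)%D) (Nat.mod_lt _ hD) (by omega) (by rw [← hcong]; exact hex)

-- splitting a non-exact prefix of w digits off the digit stream
lemma loopN_split (D : Nat) (hD : 0 < D) : ∀ (w k r : Nat), w ≤ k → r < D →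
    (r * 10^w) % D ≠ 0 →
    loopN D k r = loopN D w r ++ loopN D (k - w) ((r * 10^w) % D) := by
  intro w
  induction w with
  | zero =>
    intro k r _ hrD _
    simp [loopN, Nat.mod_eq_of_lt hrD]
  | succ w ih =>
    intro k r hwk hrD hne
    obtain ⟨k', rfl⟩ : ∃ k', k = k' + 1 := ⟨k - 1, by omega⟩
    have hcong := (step_facts D hD w r hrD).2.2.1
    have hbr : (r*10) % D ≠ 0 := by
      intro h
      apply hne
      have hdvd : D ∣ r * 10 := Nat.dvd_of_mod_eq_zero h
      have : D ∣ r * 10^(w+1) := by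
        have h2 : r * 10^(w+1) = (r*10) * 10^w := by ring
        rw [h2]
        exact hdvd.mul_right _
      exact Nat.mod_eq_zero_of_dvd this
    have hne' : (((r*10)%D) * 10^w) % D ≠ 0 := by rw [← hcong]; exact hne
    rw [loopN, if_neg hbr, loopN, if_neg hbr]
    rw [ih k' ((r*10)%D) (by omega) (Nat.mod_lt _ hD) hne']
    rw [hcong]
    simp

-- the accumulator of the chunk loop is just prepended
lemma bLoop_acc (d : Int) : ∀ (n : Nat) (rem r : Int) (ps : List (List Char)),
    rem.toNat ≤ n → bLoop d rem r ps = ps ++ bLoop d rem r [] := by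
  intro n
  induction n with
  | zero =>
    intro rem r ps hle
    have h0 : ¬ rem > 0 := by omega
    rw [bLoop, dif_neg h0, bLoop, dif_neg h0]
    simp
  | succ n ih =>
    intro rem r ps hle
    by_cases h : rem > 0
    · rw [bLoop, dif_pos h]
      conv_rhs => rw [bLoop, dif_pos h]
      simp only []
      split_ifs with h1 h2
      · simp
      · simp
      · have hlt : (rem - min rem 9).toNat ≤ n := by omega
        rw [ih _ _ (ps ++ [_]) hlt, ih _ _ ([] ++ [_]) hlt]
        simp
    · rw [bLoop, dif_neg h, bLoop, dif_neg h]
      simp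

-- the chunk loop produces exactly A's digit stream (over Nat data)
lemma bLoop_flatten (D : Nat) (hD : 0 < D) : ∀ (k r : Nat), r < D →
    (bLoop (D:Int) ((k:Nat):Int) (r:Int) []).flatten = (loopN D k r).map Nat.digitChar := by
  intro k
  induction k using Nat.strong_induction_on with
  | _ k ih =>
    intro r hrD
    by_cases hk0 : k = 0
    · subst hk0
      rw [bLoop, dif_neg (by omega)]
      simp [loopN]
    · have hpos : ((k:Nat):Int) > 0 := by omega
      set w : Nat := min k 9 with hw
      have hw1 : 1 ≤ w := by omega
      have hwk : w ≤ k := by omega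
      have hmin : min ((k:Nat):Int) 9 = ((w:Nat):Int) := by omega
      rw [bLoop, dif_pos hpos]
      simp only [hmin, Int.toNat_natCast]
      rw [show ((10:Int) ^ w) = ((10^w : Nat) : Int) by push_cast; ring]
      rw [show ((r:Int) * ((10^w : Nat) : Int)) = ((r * 10^w : Nat) : Int) by push_cast; ring]
      rw [fdiv_cast (r*10^w) D, fmod_cast (r*10^w) D]
      have hchunk := frac_chars_eq D r w hD hrD
      have hw0 : ¬ ((w : Nat) : Int) = 0 := by omega
      by_cases hrem : (r * 10^w) % D = 0
      · have hx : (((r * 10^w) % D : Nat) : Int) = 0 := by exact_mod_cast hrem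
        rw [if_pos hx]
        have hfuel : loopN D k r = loopN D w r := loopN_fuel D hD w hw1 k r hrD hwk hrem
        rw [hfuel, hchunk, if_neg hw0, if_pos hx]
        simp
      · have hrem' : ¬ (((r * 10^w) % D : Nat) : Int) = 0 := by exact_mod_cast hrem
        rw [if_neg hrem']
        have hsub : ((k:Nat):Int) - ((w:Nat):Int) = (((k - w : Nat)):Int) := by omega
        rw [hsub]
        rw [bLoop_acc (D:Int) ((k-w:Nat):Int).toNat _ _ _ le_rfl]
        rw [List.flatten_append]
        rw [ih (k - w) (by omega) ((r*10^w)%D) (Nat.mod_lt _ hD)]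
        rw [loopN_split D hD w k r hwk hrD hrem]
        rw [List.map_append, hchunk, if_neg hw0, if_neg hrem']
        simp

-- lift to an Int fuel argument (negative fuel: the loop does not run, range(dp) is empty)
lemma bLoop_eq_loopN (D : Nat) (hD : 0 < D) (dp : Int) (r : Nat) (hrD : r < D) :
    (bLoop (D:Int) dp (r:Int) []).flatten = (loopN D dp.toNat r).map Nat.digitChar := by
  by_cases h : dp > 0
  · have heq : dp = ((dp.toNat : Nat) : Int) := by omega
    rw [heq]
    exact bLoop_flatten D hD dp.toNat r hrD
  · rw [bLoop, dif_neg h]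
    have h0 : dp.toNat = 0 := by omega
    rw [h0]
    simp [loopN]

-- ===== VERDICT (by name: the statement is the Claim_ definition above) =====
theorem division_to_decimal_places_spec : Claim_equal_division_to_decimal_places := by
  unfold Claim_equal_division_to_decimal_places
  intro num den dp _hdom hpre
  unfold Spec_division_to_decimal_places division_to_decimal_places division_to_decimal_places_alt
  have hden : den ≠ 0 := hpre
  have hD : 0 < den.natAbs := Int.natAbs_pos.mpr hden
  dsimp only
  rw [Int.abs_eq_natAbs num, Int.abs_eq_natAbs den]
  set N := num.natAbs with hN
  set D := den.natAbs with hDdef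
  clear_value N D
  rw [fdiv_cast N D, fmod_cast N D]
  set r := N % D with hr
  clear_value r
  have hrD : r < D := by rw [hr]; exact Nat.mod_lt _ hD
  rw [aLoop_eq D hD dp.toNat r []]
  rw [List.nil_append, join_digits (loopN D dp.toNat r) (loopN_lt D hD dp.toNat r hrD)]
  rw [bLoop_eq_loopN D hD dp r hrD]
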